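-- pv_equiv track=rewrite | github.com/ScyisMe/Croco-Sushi | backend/app/core/security.py | is_password_common
-- ===== SOURCE A (Python) =====
-- def is_password_common(password: str) -> bool:
--     """Перевірка чи пароль є загальним/простим"""
--     common_passwords = [
--         "password", "12345678", "qwerty123", "admin123", "password123",
--         "123456789", "1234567890", "qwerty", "abc123", "monkey",
--         "1234567", "letmein", "trustno1", "dragon", "baseball",
--         "iloveyou", "master", "sunshine", "ashley", "bailey"
--     ]
--
--     password_lower = password.lower()
--
--     # Перевірка точкового збігу
--     if password_lower in common_passwords:
--         return True
--
--     # Перевірка на повторювані символи (aaaa, 1111)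
--     if len(set(password)) < 3:
--         return True
--
--     # Перевірка на послідовні символи (abcd, 1234)
--     if len(password) >= 4:
--         for i in range(len(password) - 3):
--             substr = password[i:i+4].lower()
--             if substr.isdigit() or substr.isalpha():
--                 # Перевірка чи це послідовність
--                 if all(ord(substr[j+1]) - ord(substr[j]) == 1 for j in range(len(substr)-1)):
--                     return True
--
--     return False
-- ===== SOURCE B (Python) =====
-- COMMON_PASSWORDS = frozenset([
--     "password", "12345678", "qwerty123", "admin123", "password123",
--     "123456789", "1234567890", "qwerty", "abc123", "monkey",
--     "1234567", "letmein", "trustno1", "dragon", "baseball",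
--     "iloveyou", "master", "sunshine", "ashley", "bailey",
-- ])
--
--
-- def is_password_common(password: str) -> bool:
--     """Перевірка чи пароль є загальним/простим"""
--     low = password.lower()
--
--     if low in COMMON_PASSWORDS:
--         return True
--
--     if len(set(password)) < 3:
--         return True
--
--     # Single run-length pass over adjacent pairs instead of re-scanning 4-windows:
--     # a window of 4 sequential same-category chars exists iff 3 consecutive
--     # adjacent pairs are "good" (same category, code difference 1).
--     run = 0
--     for prev, cur in zip(low, low[1:]):
--         if ((prev.isdigit() and cur.isdigit()) or
--                 (prev.isalpha() and cur.isalpha())) and ord(cur) - ord(prev) == 1: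
--             run += 1
--             if run == 3:
--                 return True
--         else:
--             run = 0
--     return False
-- ===== Notes on version B (the rewrite author's own statement) =====
-- stated objective: simpler
-- what changed: Replaces A's overlapping 4-character-window re-scans (slice, lower, isdigit/isalpha and an inner all() per index) by a single run-length pass over adjacent pairs of the once-lowered password, returning True once three consecutive same-category difference-1 pairs are seen; the common-password and distinct-character checks are kept.
import Mathlib
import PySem

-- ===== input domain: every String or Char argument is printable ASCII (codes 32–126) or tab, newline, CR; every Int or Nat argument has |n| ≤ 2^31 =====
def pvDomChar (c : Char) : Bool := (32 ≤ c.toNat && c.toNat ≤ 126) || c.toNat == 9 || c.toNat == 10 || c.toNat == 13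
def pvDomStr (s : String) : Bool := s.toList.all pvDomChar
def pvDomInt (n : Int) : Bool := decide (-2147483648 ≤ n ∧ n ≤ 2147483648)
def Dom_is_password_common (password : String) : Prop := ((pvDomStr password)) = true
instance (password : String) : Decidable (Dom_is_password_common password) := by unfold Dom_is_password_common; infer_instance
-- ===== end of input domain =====

-- B replaces A's overlapping 4-window rescans by one run-length pass over adjacent
-- pairs of the lowered password (objective: simpler single pass, same results).

-- ===== PORT A =====
def is_password_common (password : String) : Bool :=
  let common_passwords : List String :=
    ["password", "12345678", "qwerty123", "admin123", "password123",
     "123456789", "1234567890", "qwerty", "abc123", "monkey",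
     "1234567", "letmein", "trustno1", "dragon", "baseball",
     "iloveyou", "master", "sunshine", "ashley", "bailey"]
  let password_lower := PySem.Str.lower password
  if common_passwords.contains password_lower then true
  else if (PySem.Set.ofList password.toList).length < 3 then true
  else if 4 ≤ PySem.Str.len password then
    (PySem.List.pyRange 0 (PySem.Str.len password - 3)).foldl
      (fun acc i =>
        acc ||
          (let substr := PySem.Str.lower (PySem.Str.slice password (some i) (some (i + 4)))
           (PySem.Str.strIsdigit substr || PySem.Str.strIsalpha substr) &&
           (PySem.List.pyRange 0 (PySem.Str.len substr - 1)).all (fun j =>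
              match PySem.Str.pyGet? substr (j + 1), PySem.Str.pyGet? substr j with
              | some c1, some c0 => ((c1.toNat : Int) - (c0.toNat : Int) == 1)
              | _, _ => false)))
      false
  else false

-- ===== PORT B =====
-- module-level frozenset of Source B (a Python set of distinct strings)
def pvCommonSet : PySem.Set String :=
  PySem.Set.ofList
    ["password", "12345678", "qwerty123", "admin123", "password123",
     "123456789", "1234567890", "qwerty", "abc123", "monkey",
     "1234567", "letmein", "trustno1", "dragon", "baseball",
     "iloveyou", "master", "sunshine", "ashley", "bailey"]

-- Source B's pair test: same category (both digits or both letters) and code difference 1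
def pvGoodPair (prev cur : Char) : Bool :=
  ((PySem.Chars.isdigit prev && PySem.Chars.isdigit cur) ||
   (PySem.Chars.isalpha prev && PySem.Chars.isalpha cur)) &&
  ((cur.toNat : Int) - (prev.toNat : Int) == 1)

def is_password_common_alt (password : String) : Bool :=
  let low := PySem.Str.lower password
  if pvCommonSet.contains low then true
  else if (PySem.Set.ofList password.toList).length < 3 then true
  else
    -- zip(low, low[1:]) with a run counter; Source B's early `return True` = sticky found flag
    ((low.toList.zip (low.toList.drop 1)).foldl
      (fun st p =>
        if st.2 then st
        else if pvGoodPair p.1 p.2 then (st.1 + 1, st.1 + 1 == 3)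
        else (0, false))
      ((0 : Nat), false)).2

-- ===== PRECONDITION & SPEC =====
def Spec_is_password_common (password : String) (out : Bool) : Prop := out = is_password_common_alt password
instance (password : String) (out : Bool) : Decidable (Spec_is_password_common password out) := by unfold Spec_is_password_common; infer_instance

-- ===== CLAIM (what is proved, stated in full; the proofs are below) =====
def Claim_equal_is_password_common : Prop := ∀ (password : String), Dom_is_password_common password → Spec_is_password_common password (is_password_common password)

-- ===== LEMMAS AND PROOFS =====

-- proof-side helpers
def pvGood3 (l : List Char) (k : Nat) : Bool :=
  pvGoodPair (l.getD k ' ') (l.getD (k + 1) ' ') &&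
  pvGoodPair (l.getD (k + 1) ' ') (l.getD (k + 2) ' ') &&
  pvGoodPair (l.getD (k + 2) ' ') (l.getD (k + 3) ' ')

-- "some 4-window of l is sequential": the characterisation both loops are proved against
def pvE (l : List Char) : Prop := ∃ k, k + 3 < l.length ∧ pvGood3 l k = true

-- "three consecutive true entries" in a Bool list
def pvT3 (bs : List Bool) : Prop :=
  ∃ i, i + 2 < bs.length ∧ bs.getD i false = true ∧ bs.getD (i + 1) false = true ∧ bs.getD (i + 2) false = true

def pvLead (bs : List Bool) : Nat := (bs.takeWhile id).length

def pvStep (st : Nat × Bool) (b : Bool) : Nat × Bool :=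
  if st.2 then st else if b then (st.1 + 1, st.1 + 1 == 3) else (0, false)

-- A's window body, named for the proofs (definitionally the loop body of port A)
def pvWinA (password : String) (i : Int) : Bool :=
  let substr := PySem.Str.lower (PySem.Str.slice password (some i) (some (i + 4)))
  (PySem.Str.strIsdigit substr || PySem.Str.strIsalpha substr) &&
  (PySem.List.pyRange 0 (PySem.Str.len substr - 1)).all (fun j =>
     match PySem.Str.pyGet? substr (j + 1), PySem.Str.pyGet? substr j with
     | some c1, some c0 => ((c1.toNat : Int) - (c0.toNat : Int) == 1)
     | _, _ => false)

lemma pv_disj (c : Char) (h : PySem.Chars.isdigit c = true) : PySem.Chars.isalpha c = false := by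
  have h0 : '0'.val.toNat = 48 := rfl
  have h9 : '9'.val.toNat = 57 := rfl
  have hA : 'A'.val.toNat = 65 := rfl
  have hZ : 'Z'.val.toNat = 90 := rfl
  have ha : 'a'.val.toNat = 97 := rfl
  have hz : 'z'.val.toNat = 122 := rfl
  simp only [PySem.Chars.isdigit, PySem.Chars.isalpha, PySem.Chars.isupper, PySem.Chars.islower,
    Bool.and_eq_true, Bool.or_eq_false_iff, Bool.and_eq_false_iff, decide_eq_true_eq,
    decide_eq_false_iff_not, Char.le_def, UInt32.le_iff_toNat_le] at *
  omega

-- a 4-window is uniform-category sequential iff its three adjacent pairs are good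
lemma pvWindow_eq (c0 c1 c2 c3 : Char) :
    ((PySem.Chars.strIsdigit [c0, c1, c2, c3] || PySem.Chars.strIsalpha [c0, c1, c2, c3]) &&
     (PySem.List.pyRange 0 3).all (fun j =>
        match PySem.List.pyGet? [c0, c1, c2, c3] (j + 1), PySem.List.pyGet? [c0, c1, c2, c3] j with
        | some d1, some d0 => ((d1.toNat : Int) - (d0.toNat : Int) == 1)
        | _, _ => false))
    = (pvGoodPair c0 c1 && pvGoodPair c1 c2 && pvGoodPair c2 c3) := by
  have hr : PySem.List.pyRange 0 3 = [0, 1, 2] := by decide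
  rw [hr]
  simp only [List.all_cons, List.all_nil, PySem.List.pyGet?, PySem.List.pyIdx?,
    PySem.Chars.strIsdigit, PySem.Chars.strIsalpha, pvGoodPair]
  norm_num
  rw [Bool.eq_iff_iff]
  simp only [Bool.and_eq_true, Bool.or_eq_true, beq_iff_eq]
  constructor
  · rintro ⟨(⟨d0, d1, d2, d3⟩ | ⟨a0, a1, a2, a3⟩), e1, e2, e3⟩ <;> tauto
  · rintro ⟨⟨⟨h1, e1⟩, h2, e2⟩, h3, e3⟩
    refine ⟨?_, e1, e2, e3⟩
    rcases h1 with ⟨d0, d1⟩ | ⟨a0, a1⟩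
    · rcases h2 with ⟨_, d2⟩ | ⟨a1', _⟩
      · rcases h3 with ⟨_, d3⟩ | ⟨a2', _⟩
        · exact Or.inl ⟨d0, d1, d2, d3⟩
        · exact absurd a2' (by simp [pv_disj _ d2])
      · exact absurd a1' (by simp [pv_disj _ d1])
    · rcases h2 with ⟨d1', _⟩ | ⟨_, a2⟩
      · exact absurd (pv_disj _ d1') (by simp [a1])
      · rcases h3 with ⟨d2', _⟩ | ⟨_, a3⟩
        · exact absurd (pv_disj _ d2') (by simp [a2])
        · exact Or.inr ⟨a0, a1, a2, a3⟩

lemma pv_foldl_or_any {α : Type} (xs : List α) (f : α → Bool) (b : Bool) :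
    xs.foldl (fun acc x => acc || f x) b = (b || xs.any f) := by
  induction xs generalizing b with
  | nil => simp
  | cons x xs ih => simp [List.foldl_cons, ih, Bool.or_assoc]

lemma pv_take4_drop (l : List Char) (k : Nat) (h : k + 3 < l.length) :
    (l.drop k).take 4 = [l.getD k ' ', l.getD (k + 1) ' ', l.getD (k + 2) ' ', l.getD (k + 3) ' '] := by
  induction l generalizing k with
  | nil => simp at h
  | cons a l ih =>
    cases k with
    | zero =>
      match l, h with
      | b :: c :: d :: t, _ => simp [List.getD]
    | succ k =>
      simp only [List.drop_succ_cons, List.getD_cons_succ]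
      exact ih k (by simpa using h)

lemma pvWinA_eq (password : String) (k : Nat) (h : k + 3 < password.toList.length) :
    pvWinA password (k : Int) = pvGood3 (PySem.Chars.lower password.toList) k := by
  have hcast : ((k : Int) + 4) = ((k + 4 : Nat) : Int) := by push_cast; ring
  have hsub : (PySem.Str.lower (PySem.Str.slice password (some (k : Int)) (some ((k : Int) + 4)))).toList
      = [(PySem.Chars.lower password.toList).getD k ' ',
         (PySem.Chars.lower password.toList).getD (k + 1) ' ',
         (PySem.Chars.lower password.toList).getD (k + 2) ' ',
         (PySem.Chars.lower password.toList).getD (k + 3) ' '] := by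
    rw [PySem.Str.toList_lower, PySem.Str.toList_slice, PySem.Chars.slice_eq_listSlice, hcast,
      PySem.List.slice_natCast]
    have h4 : k + 4 - k = 4 := by omega
    rw [h4]
    have hmap : PySem.Chars.lower ((password.toList.drop k).take 4)
        = ((PySem.Chars.lower password.toList).drop k).take 4 := by
      simp [PySem.Chars.lower, List.map_take, List.map_drop]
    rw [hmap, pv_take4_drop _ k (by simpa [PySem.Chars.lower] using h)]
  unfold pvWinA
  simp only [PySem.Str.strIsdigit_eq, PySem.Str.strIsalpha_eq, PySem.Str.len_eq,
    PySem.Str.pyGet?_eq, PySem.Chars.pyGet?_eq_listPyGet?, hsub]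
  have hlen : (([(PySem.Chars.lower password.toList).getD k ' ',
         (PySem.Chars.lower password.toList).getD (k + 1) ' ',
         (PySem.Chars.lower password.toList).getD (k + 2) ' ',
         (PySem.Chars.lower password.toList).getD (k + 3) ' '] : List Char).length : Int) - 1 = 3 := by
    simp
  rw [hlen, pvWindow_eq]
  rfl

lemma pvA_loop (password : String) (h4 : 4 ≤ password.toList.length) :
    ((PySem.List.pyRange 0 (PySem.Str.len password - 3)).foldl
      (fun acc i => acc || pvWinA password i) false = true)
    ↔ pvE (PySem.Chars.lower password.toList) := by
  have hn : PySem.Str.len password - 3 = ((password.toList.length - 3 : Nat) : Int) := by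
    rw [PySem.Str.len_eq]; omega
  rw [hn, PySem.List.pyRange_zero_natCast, pv_foldl_or_any, Bool.false_or, List.any_map,
    List.any_eq_true]
  simp only [Function.comp_apply]
  constructor
  · rintro ⟨k, hk, hw⟩
    rw [List.mem_range] at hk
    have hb : k + 3 < password.toList.length := Nat.add_lt_of_lt_sub hk
    rw [pvWinA_eq password k hb] at hw
    exact ⟨k, by simpa [PySem.Chars.lower] using hb, hw⟩
  · rintro ⟨k, hk, hg⟩
    have hb : k + 3 < password.toList.length := by
      simpa [PySem.Chars.lower] using hk
    refine ⟨k, List.mem_range.mpr (Nat.lt_sub_of_add_lt hb), ?_⟩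
    rw [pvWinA_eq password k hb]
    exact hg

lemma pvStep_sticky (bs : List Bool) (st : Nat × Bool) (h : st.2 = true) :
    (bs.foldl pvStep st).2 = true := by
  induction bs generalizing st with
  | nil => exact h
  | cons b bs ih => simp only [List.foldl_cons, pvStep, h, if_true]; exact ih st h

lemma pvLead_lt (bs : List Bool) (k : Nat) (h : k < pvLead bs) :
    bs.getD k false = true ∧ k < bs.length := by
  have hle : pvLead bs ≤ bs.length := by
    simpa [pvLead] using (List.takeWhile_prefix (p := id) (l := bs)).length_le
  have hk : k < bs.length := lt_of_lt_of_le h hle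
  have hpre : (bs.takeWhile id) <+: bs := List.takeWhile_prefix _
  have hget : (bs.takeWhile id)[k]'(by simpa [pvLead] using h) = bs[k]'hk := hpre.getElem _
  have hmem : (bs.takeWhile id)[k]'(by simpa [pvLead] using h) ∈ bs.takeWhile id := List.getElem_mem _
  have := List.mem_takeWhile_imp hmem
  rw [hget] at this
  exact ⟨by simp [List.getD_eq_getElem?_getD, List.getElem?_eq_getElem hk]; simpa using this, hk⟩

lemma pvLead_two (bs : List Bool) (hl : 2 ≤ bs.length)
    (h0 : bs.getD 0 false = true) (h1 : bs.getD 1 false = true) : 2 ≤ pvLead bs := by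
  match bs, hl with
  | a :: b :: t, _ =>
    simp only [List.getD_cons_zero, List.getD_cons_succ] at h0 h1
    simp [pvLead, h0, h1]

lemma pvT3_of_lead (bs : List Bool) (h : 3 ≤ pvLead bs) : pvT3 bs := by
  obtain ⟨g0, _⟩ := pvLead_lt bs 0 (by omega)
  obtain ⟨g1, _⟩ := pvLead_lt bs 1 (by omega)
  obtain ⟨g2, h2⟩ := pvLead_lt bs 2 (by omega)
  exact ⟨0, by omega, g0, g1, g2⟩

lemma pvT3_cons_false (bs : List Bool) : pvT3 (false :: bs) ↔ pvT3 bs := by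
  constructor
  · rintro ⟨i, hi, g0, g1, g2⟩
    cases i with
    | zero => simp at g0
    | succ j =>
      exact ⟨j, by simpa using hi, by simpa using g0, by simpa using g1, by simpa using g2⟩
  · rintro ⟨j, hj, g0, g1, g2⟩
    exact ⟨j + 1, by simpa using hj, by simpa using g0, by simpa using g1, by simpa using g2⟩

lemma pvT3_cons_true (bs : List Bool) : pvT3 (true :: bs) ↔ pvT3 bs ∨ 2 ≤ pvLead bs := by
  constructor
  · rintro ⟨i, hi, g0, g1, g2⟩
    cases i with
    | zero =>
      refine Or.inr (pvLead_two bs (by simp at hi; omega) ?_ ?_)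
      · simpa using g1
      · simpa using g2
    | succ j =>
      exact Or.inl ⟨j, by simpa using hi, by simpa using g0, by simpa using g1, by simpa using g2⟩
  · rintro (⟨j, hj, g0, g1, g2⟩ | h2)
    · exact ⟨j + 1, by simpa using hj, by simpa using g0, by simpa using g1, by simpa using g2⟩
    · obtain ⟨g0, _⟩ := pvLead_lt bs 0 (by omega)
      obtain ⟨g1, h1⟩ := pvLead_lt bs 1 (by omega)
      exact ⟨0, by simp; omega, by simp, by simpa using g0, by simpa using g1⟩

lemma pvRun (bs : List Bool) (r : Nat) (hr : r ≤ 2) :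
    ((bs.foldl pvStep (r, false)).2 = true) ↔ 3 ≤ r + pvLead bs ∨ pvT3 bs := by
  induction bs generalizing r with
  | nil =>
    simp only [List.foldl_nil]
    constructor
    · intro h; simp at h
    · rintro (h | ⟨i, hi, _⟩)
      · simp [pvLead] at h; omega
      · simp at hi
  | cons b bs ih =>
    cases b with
    | false =>
      have hstep : pvStep (r, false) false = (0, false) := by simp [pvStep]
      rw [List.foldl_cons, hstep, ih 0 (by omega)]
      have habs : 3 ≤ pvLead bs → pvT3 bs := pvT3_of_lead bs
      simp only [pvT3_cons_false, pvLead, List.takeWhile_cons]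
      simp only [id, if_neg (by simp : ¬(false = true))]
      constructor
      · rintro (h | h)
        · exact Or.inr (habs (by simpa [pvLead] using h))
        · exact Or.inr h
      · rintro (h | h)
        · simp at h; omega
        · exact Or.inr h
    | true =>
      by_cases hr2 : r = 2
      · subst hr2
        have hstep : pvStep (2, false) true = (3, true) := by simp [pvStep]
        rw [List.foldl_cons, hstep]
        have hst : (bs.foldl pvStep (3, true)).2 = true := pvStep_sticky bs _ rfl
        rw [hst]
        simp only [true_iff]
        left
        have : pvLead (true :: bs) = pvLead bs + 1 := by simp [pvLead]
        omega
      · have hstep : pvStep (r, false) true = (r + 1, false) := by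
          simp [pvStep]; omega
        rw [List.foldl_cons, hstep, ih (r + 1) (by omega)]
        rw [pvT3_cons_true]
        have hlead : pvLead (true :: bs) = pvLead bs + 1 := by simp [pvLead]
        rw [hlead]
        constructor
        · rintro (h | h)
          · left; omega
          · right; left; exact h
        · rintro (h | h | h)
          · left; omega
          · right; exact h
          · left; omega

lemma pv_zip_getElem? (l : List Char) (i : Nat) (h : i < (l.zip (l.drop 1)).length) :
    (l.zip (l.drop 1))[i]? = some (l.getD i ' ', l.getD (i + 1) ' ') := by
  rw [List.getElem?_eq_getElem h, List.getElem_zip]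
  have h2 : i < l.length := by simp [List.length_zip] at h; omega
  have h3 : i + 1 < l.length := by simp [List.length_zip] at h ⊢; omega
  simp [List.getD_eq_getElem?_getD, h2, h3]

lemma pvE_iff (l : List Char) :
    pvE l ↔ pvT3 ((l.zip (l.drop 1)).map (fun p => pvGoodPair p.1 p.2)) := by
  have hlen : ((l.zip (l.drop 1)).map (fun p => pvGoodPair p.1 p.2)).length = l.length - 1 := by
    simp [List.length_zip]
  have hget : ∀ i, i + 1 < l.length →
      ((l.zip (l.drop 1)).map (fun p => pvGoodPair p.1 p.2)).getD i false
        = pvGoodPair (l.getD i ' ') (l.getD (i + 1) ' ') := by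
    intro i hi
    have hz : i < (l.zip (l.drop 1)).length := by simp [List.length_zip]; omega
    rw [List.getD_eq_getElem?_getD, List.getElem?_map, pv_zip_getElem? l i hz]
    rfl
  constructor
  · rintro ⟨k, hk, hg⟩
    simp only [pvGood3, Bool.and_eq_true] at hg
    obtain ⟨⟨g1, g2⟩, g3⟩ := hg
    refine ⟨k, by omega, ?_, ?_, ?_⟩
    · rw [hget k (by omega)]; exact g1
    · rw [hget (k + 1) (by omega)]; exact g2
    · rw [hget (k + 2) (by omega)]; exact g3
  · rintro ⟨i, hi, g1, g2, g3⟩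
    rw [hlen] at hi
    rw [hget i (by omega)] at g1
    rw [hget (i + 1) (by omega)] at g2
    rw [hget (i + 2) (by omega)] at g3
    refine ⟨i, by omega, ?_⟩
    simp only [pvGood3, Bool.and_eq_true]
    exact ⟨⟨g1, g2⟩, g3⟩

lemma pvB_scan (l : List Char) :
    (((l.zip (l.drop 1)).foldl
      (fun st p =>
        if st.2 then st
        else if pvGoodPair p.1 p.2 then (st.1 + 1, st.1 + 1 == 3)
        else (0, false))
      ((0 : Nat), false)).2 = true)
    ↔ pvT3 ((l.zip (l.drop 1)).map (fun p => pvGoodPair p.1 p.2)) := by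
  have hfold : (l.zip (l.drop 1)).foldl
      (fun st p =>
        if st.2 then st
        else if pvGoodPair p.1 p.2 then (st.1 + 1, st.1 + 1 == 3)
        else (0, false))
      ((0 : Nat), false)
      = ((l.zip (l.drop 1)).map (fun p => pvGoodPair p.1 p.2)).foldl pvStep ((0 : Nat), false) := by
    rw [List.foldl_map]
    rfl
  rw [hfold, pvRun _ 0 (by omega)]
  constructor
  · rintro (h | h)
    · exact pvT3_of_lead _ (by omega)
    · exact h
  · exact fun h => Or.inr h

lemma pv_set_contains (xs : List String) (y : String) :
    (PySem.Set.ofList xs).contains y = xs.contains y := by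
  rw [Bool.eq_iff_iff]
  simp [PySem.Set.mem_ofList]

-- ===== VERDICT (by name: the statement is the Claim_ definition above) =====
theorem is_password_common_spec : Claim_equal_is_password_common := by
  intro password _
  unfold Spec_is_password_common is_password_common is_password_common_alt
  dsimp only []
  rw [pvCommonSet, pv_set_contains]
  split_ifs with hc hs h4
  · rfl
  · rfl
  · -- both sequential scans
    change List.foldl (fun acc i => acc || pvWinA password i) false _ = _
    have h4n : 4 ≤ password.toList.length := by
      rw [PySem.Str.len_eq] at h4; exact_mod_cast h4
    rw [Bool.eq_iff_iff, pvA_loop password h4n, PySem.Str.toList_lower]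
    exact (pvE_iff _).trans (pvB_scan _).symm
  · -- password shorter than 4: no window for A, no 3-run for B
    have h4n : password.toList.length < 4 := by
      rw [PySem.Str.len_eq] at h4; omega
    rw [eq_comm, Bool.eq_false_iff]
    intro hscan
    rw [PySem.Str.toList_lower] at hscan
    obtain ⟨i, hi, -⟩ := (pvB_scan _).mp hscan
    simp only [List.length_map, List.length_zip, List.length_drop, PySem.Chars.lower,
      List.length_map] at hi
    omega
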